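-- pv_equiv track=rewrite | github.com/slovjinika/dec2glag | dec2glag_demo.py | dec2glag
-- ===== SOURCE A (Python) =====
-- def dec2glag(input_number, use_titlo=False):
--     if not 1 <= input_number <= 5999:
--          raise ValueError("The number must be from 1 to 5999")
--     glagolitic_symbols = {
--         1000: "ⱍⱎⱏⱑⱓ",
--         100: "ⱃⱄⱅⱆⱇⱈⱉⱋⱌ",
--         10: "ⰺⰻⰼⰽⰾⰿⱀⱁⱂ",
--         1: "ⰰⰱⰲⰳⰴⰵⰶⰷⰸ"
--     }
--     result = ""
--
--     for divisor, symbols in glagolitic_symbols.items():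
--         quotient, input_number = divmod(input_number, divisor)
--         if quotient > 0:
--             if divisor == 10 and 1 <= quotient <= 9:
--                 tens = symbols[quotient - 1]
--                 ones = glagolitic_symbols[1][input_number - 1] if input_number > 0 else ""
--                 if 11 <= (quotient * 10 + input_number) <= 19:
--                     result += ones + tens
--                 else:
--                     result += tens + ones
--                 break
--             else:
--                 result += symbols[quotient - 1]
--
--     if use_titlo:
--         titlo = "҃"
--         if len(result) == 1:
--             result = result + titlo
--         else:
--             result = result[:-1] + titlo + result[-1]
--
--     return result
-- ===== SOURCE B (Python) =====
-- def dec2glag(input_number, use_titlo=False):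
--     if not 1 <= input_number <= 5999:
--         raise ValueError("The number must be from 1 to 5999")
--     TH = "\u2c4d\u2c4e\u2c4f\u2c51\u2c53"
--     H = "\u2c43\u2c44\u2c45\u2c46\u2c47\u2c48\u2c49\u2c4b\u2c4c"
--     T = "\u2c3a\u2c3b\u2c3c\u2c3d\u2c3e\u2c3f\u2c40\u2c41\u2c42"
--     O = "\u2c30\u2c31\u2c32\u2c33\u2c34\u2c35\u2c36\u2c37\u2c38"
--     # Roman-numeral-style greedy over a descending value table; teens 11..19 are
--     # composite two-glyph entries (ones before tens), listed above 10 so they win.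
--     table = []
--     for d in range(5, 0, -1):
--         table.append((d * 1000, TH[d - 1]))
--     for d in range(9, 0, -1):
--         table.append((d * 100, H[d - 1]))
--     for d in range(9, 1, -1):
--         table.append((d * 10, T[d - 1]))
--     for d in range(9, 0, -1):
--         table.append((10 + d, O[d - 1] + T[0]))
--     table.append((10, T[0]))
--     for d in range(9, 0, -1):
--         table.append((d, O[d - 1]))
--     result = ""
--     n = input_number
--     for value, sym in table:
--         if n >= value:
--             result += sym
--             n -= value
--     if use_titlo:
--         titlo = "\u0483"
--         if len(result) == 1:
--             result = result + titlo
--         else: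
--             result = result[:-1] + titlo + result[-1]
--     return result
-- ===== Notes on version B (the rewrite author's own statement) =====
-- stated objective: alternative
-- what changed: Replaces A's per-place divmod digit extraction (dict loop with break and leftover remainder) by a Roman-numeral-style greedy: a descending value-to-glyph table (teens 11-19 as composite two-glyph entries placed above 10) traversed once with repeated subtraction.
import Mathlib
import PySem

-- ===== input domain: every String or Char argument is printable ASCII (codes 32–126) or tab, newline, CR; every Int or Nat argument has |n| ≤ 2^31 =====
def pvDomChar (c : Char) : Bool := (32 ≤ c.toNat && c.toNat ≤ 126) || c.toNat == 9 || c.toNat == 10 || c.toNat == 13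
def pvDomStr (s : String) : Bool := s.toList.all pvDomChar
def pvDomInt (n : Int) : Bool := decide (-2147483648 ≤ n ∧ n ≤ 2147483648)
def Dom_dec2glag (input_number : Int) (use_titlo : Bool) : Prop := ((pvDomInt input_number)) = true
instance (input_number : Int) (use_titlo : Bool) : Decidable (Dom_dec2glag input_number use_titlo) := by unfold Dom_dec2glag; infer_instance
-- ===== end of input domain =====

-- B replaces A's per-place divmod digit extraction by a Roman-numeral-style greedy over a
-- descending value->glyph table (teens 11..19 as composite entries): objective 'alternative'.
-- Both programs raise ValueError outside 1..5999; Pre_ excludes exactly those inputs.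
-- Strings are ported as lists of code points (PySem.Chars convention), rebuilt with String.ofList.

-- ===== PORT A =====
-- the four entries of A's glagolitic_symbols dict, in insertion order
def glagOnesA : List Char := ['ⰰ','ⰱ','ⰲ','ⰳ','ⰴ','ⰵ','ⰶ','ⰷ','ⰸ']
def glagSymbolsA : List (Int × List Char) :=
  [(1000, ['ⱍ','ⱎ','ⱏ','ⱑ','ⱓ']),
   (100,  ['ⱃ','ⱄ','ⱅ','ⱆ','ⱇ','ⱈ','ⱉ','ⱋ','ⱌ']),
   (10,   ['ⰺ','ⰻ','ⰼ','ⰽ','ⰾ','ⰿ','ⱀ','ⱁ','ⱂ']),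
   (1,    glagOnesA)]

-- one-character string s[i] (valid index inside Pre_; Python raises on an invalid one)
def glagChar (s : List Char) (i : Int) : List Char :=
  (PySem.List.pyGet? s i).elim [] (fun c => [c])

-- A's 'for divisor, symbols in glagolitic_symbols.items():' loop, with the break
-- rendered as returning without recursing; state = (input_number, result)
def dec2glagLoopA : List (Int × List Char) → Int → List Char → List Char
  | [], _, result => result
  | (divisor, symbols) :: rest, n, result =>
      let quotient := PySem.Int.floordiv n divisor
      let n' := PySem.Int.mod n divisor
      if quotient > 0 then
        if divisor = 10 ∧ 1 ≤ quotient ∧ quotient ≤ 9 then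
          let tens := glagChar symbols (quotient - 1)
          let ones := if n' > 0 then glagChar glagOnesA (n' - 1) else []
          if 11 ≤ quotient * 10 + n' ∧ quotient * 10 + n' ≤ 19 then
            result ++ (ones ++ tens)
          else
            result ++ (tens ++ ones)
        else
          dec2glagLoopA rest n' (result ++ glagChar symbols (quotient - 1))
      else dec2glagLoopA rest n' result

def glagTitlo : Char := '҃'

-- the 'if use_titlo' tail, shared VERBATIM by both Python programs (identical code in Source A and Source B)
def glagApplyTitlo (result : List Char) (use_titlo : Bool) : List Char :=
  if use_titlo then
    if result.length = 1 then result ++ [glagTitlo]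
    else PySem.List.slice result none (some (-1)) ++ [glagTitlo] ++ glagChar result (-1)
  else result

def dec2glag (input_number : Int) (use_titlo : Bool) : String :=
  -- A raises ValueError unless 1 ≤ input_number ≤ 5999 (excluded by Pre_dec2glag)
  let result := dec2glagLoopA glagSymbolsA input_number []
  String.ofList (glagApplyTitlo result use_titlo)

-- ===== PORT B =====
def glagTH : List Char := ['ⱍ','ⱎ','ⱏ','ⱑ','ⱓ']
def glagH  : List Char := ['ⱃ','ⱄ','ⱅ','ⱆ','ⱇ','ⱈ','ⱉ','ⱋ','ⱌ']
def glagT  : List Char := ['ⰺ','ⰻ','ⰼ','ⰽ','ⰾ','ⰿ','ⱀ','ⱁ','ⱂ']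
def glagO  : List Char := ['ⰰ','ⰱ','ⰲ','ⰳ','ⰴ','ⰵ','ⰶ','ⰷ','ⰸ']

-- Source B's table-building loops, each a fold over the corresponding range(...)
def glagTable : List (Int × List Char) :=
  let table : List (Int × List Char) := []
  let table := (PySem.List.pyRange 5 0 (-1)).foldl
    (fun tb d => tb ++ [(d * 1000, glagChar glagTH (d - 1))]) table
  let table := (PySem.List.pyRange 9 0 (-1)).foldl
    (fun tb d => tb ++ [(d * 100, glagChar glagH (d - 1))]) table
  let table := (PySem.List.pyRange 9 1 (-1)).foldl
    (fun tb d => tb ++ [(d * 10, glagChar glagT (d - 1))]) table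
  let table := (PySem.List.pyRange 9 0 (-1)).foldl
    (fun tb d => tb ++ [(10 + d, glagChar glagO (d - 1) ++ glagChar glagT 0)]) table
  let table := table ++ [(10, glagChar glagT 0)]
  (PySem.List.pyRange 9 0 (-1)).foldl
    (fun tb d => tb ++ [(d, glagChar glagO (d - 1))]) table

-- the body of Source B's 'for value, sym in table:' loop
def glagStep (st : List Char × Int) (p : Int × List Char) : List Char × Int :=
  if st.2 ≥ p.1 then (st.1 ++ p.2, st.2 - p.1) else st

def dec2glag_alt (input_number : Int) (use_titlo : Bool) : String :=
  -- B raises ValueError unless 1 ≤ input_number ≤ 5999 (excluded by Pre_dec2glag)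
  let st := glagTable.foldl glagStep ([], input_number)
  String.ofList (glagApplyTitlo st.1 use_titlo)

-- ===== PRECONDITION & SPEC =====
-- Pre_ excludes exactly the inputs on which A raises ValueError (and B raises the same).
def Pre_dec2glag (input_number : Int) (use_titlo : Bool) : Prop :=
  1 ≤ input_number ∧ input_number ≤ 5999
instance (input_number : Int) (use_titlo : Bool) : Decidable (Pre_dec2glag input_number use_titlo) := by unfold Pre_dec2glag; infer_instance

def pvWitness_dec2glag : Int × Bool := (1917, true)

def Spec_dec2glag (input_number : Int) (use_titlo : Bool) (out : String) : Prop := out = dec2glag_alt input_number use_titlo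
instance (input_number : Int) (use_titlo : Bool) (out : String) : Decidable (Spec_dec2glag input_number use_titlo out) := by unfold Spec_dec2glag; infer_instance

-- ===== CLAIM (what is proved, stated in full; the proofs are below) =====
def Claim_equal_dec2glag : Prop := ∀ (input_number : Int) (use_titlo : Bool), Dom_dec2glag input_number use_titlo → Pre_dec2glag input_number use_titlo → Spec_dec2glag input_number use_titlo (dec2glag input_number use_titlo)

-- ===== LEMMAS AND PROOFS =====

-- the table Source B builds, as a literal (proved equal to glagTable once, so the
-- per-chunk kernel checks need not rebuild it)
def glagTableL : List (Int × List Char) :=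
  [(5000, ['ⱓ']),
   (4000, ['ⱑ']),
   (3000, ['ⱏ']),
   (2000, ['ⱎ']),
   (1000, ['ⱍ']),
   (900, ['ⱌ']),
   (800, ['ⱋ']),
   (700, ['ⱉ']),
   (600, ['ⱈ']),
   (500, ['ⱇ']),
   (400, ['ⱆ']),
   (300, ['ⱅ']),
   (200, ['ⱄ']),
   (100, ['ⱃ']),
   (90, ['ⱂ']),
   (80, ['ⱁ']),
   (70, ['ⱀ']),
   (60, ['ⰿ']),
   (50, ['ⰾ']),
   (40, ['ⰽ']),
   (30, ['ⰼ']),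
   (20, ['ⰻ']),
   (19, ['ⰸ','ⰺ']),
   (18, ['ⰷ','ⰺ']),
   (17, ['ⰶ','ⰺ']),
   (16, ['ⰵ','ⰺ']),
   (15, ['ⰴ','ⰺ']),
   (14, ['ⰳ','ⰺ']),
   (13, ['ⰲ','ⰺ']),
   (12, ['ⰱ','ⰺ']),
   (11, ['ⰰ','ⰺ']),
   (10, ['ⰺ']),
   (9, ['ⰸ']),
   (8, ['ⰷ']),
   (7, ['ⰶ']),
   (6, ['ⰵ']),
   (5, ['ⰴ']),
   (4, ['ⰳ']),
   (3, ['ⰲ']),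
   (2, ['ⰱ']),
   (1, ['ⰰ'])]

theorem glagTable_eq_lit : glagTable = glagTableL := by decide

-- Boolean check of one input n = k + C: A's loop result equals B's greedy result
def glagCheck (k C : Nat) : Bool :=
  dec2glagLoopA glagSymbolsA ((k : Int) + (C : Int)) []
    == (glagTableL.foldl glagStep ([], (k : Int) + (C : Int))).1

theorem glag_of_check (sz C : Nat)
    (h : (List.range sz).all (fun k => glagCheck k C) = true)
    (k : Nat) (hk : k < sz) :
    dec2glagLoopA glagSymbolsA ((k : Int) + (C : Int)) []
      = (glagTableL.foldl glagStep ([], (k : Int) + (C : Int))).1 := by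
  have := List.all_eq_true.mp h k (List.mem_range.mpr hk)
  exact eq_of_beq this

set_option maxRecDepth 400000 in
theorem glag_chunk0 : (List.range 1000).all (fun k => glagCheck k 1) = true := by decide

set_option maxRecDepth 400000 in
theorem glag_chunk1 : (List.range 1000).all (fun k => glagCheck k 1001) = true := by decide

set_option maxRecDepth 400000 in
theorem glag_chunk2 : (List.range 1000).all (fun k => glagCheck k 2001) = true := by decide

set_option maxRecDepth 400000 in
theorem glag_chunk3 : (List.range 1000).all (fun k => glagCheck k 3001) = true := by decide

set_option maxRecDepth 400000 in
theorem glag_chunk4 : (List.range 1000).all (fun k => glagCheck k 4001) = true := by decide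

set_option maxRecDepth 400000 in
theorem glag_chunk5 : (List.range 999).all (fun k => glagCheck k 5001) = true := by decide

-- per-chunk finite checks combined over the whole range 1..5999
theorem glag_core_eq (n : Int) (h1 : 1 ≤ n) (h2 : n ≤ 5999) :
    dec2glagLoopA glagSymbolsA n []
      = (glagTable.foldl glagStep ([], n)).1 := by
  rw [glagTable_eq_lit]
  by_cases c0 : n ≤ 1000
  · have hk : n = ((n - 1).toNat : Int) + 1 := by omega
    rw [hk]; exact glag_of_check 1000 1 glag_chunk0 _ (by omega)
  ·
    by_cases c1 : n ≤ 2000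
    · have hk : n = ((n - 1001).toNat : Int) + 1001 := by omega
      rw [hk]; exact glag_of_check 1000 1001 glag_chunk1 _ (by omega)
    ·
      by_cases c2 : n ≤ 3000
      · have hk : n = ((n - 2001).toNat : Int) + 2001 := by omega
        rw [hk]; exact glag_of_check 1000 2001 glag_chunk2 _ (by omega)
      ·
        by_cases c3 : n ≤ 4000
        · have hk : n = ((n - 3001).toNat : Int) + 3001 := by omega
          rw [hk]; exact glag_of_check 1000 3001 glag_chunk3 _ (by omega)
        ·
          by_cases c4 : n ≤ 5000
          · have hk : n = ((n - 4001).toNat : Int) + 4001 := by omega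
            rw [hk]; exact glag_of_check 1000 4001 glag_chunk4 _ (by omega)
          ·
            have hk : n = ((n - 5001).toNat : Int) + 5001 := by omega
            rw [hk]; exact glag_of_check 999 5001 glag_chunk5 _ (by omega)

-- ===== VERDICT (by name: the statement is the Claim_ definition above) =====
theorem dec2glag_spec : Claim_equal_dec2glag := by
  intro n b _ hpre
  show dec2glag n b = dec2glag_alt n b
  unfold dec2glag dec2glag_alt
  rw [glag_core_eq n hpre.1 hpre.2]
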